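-- pv_equiv track=rewrite | github.com/Npaquier-brea/Appero | MultiDiToAdjEuler.py | is_DiEulerian
-- ===== SOURCE A (Python) =====
-- def is_DiEulerian(adjList):
--     D1 = None
--     D2 = None
--     for e in adjList:
--         if e[1] != 0:
--             if D1 == None:
--                 D1 = e[1]
--             elif D2 == None:
--                 D2 = e[1]
--             else:
--                 return False
--     return True if (D1 == -1 and D2 == 1) or (D2 == 1 and D2 == -1) else False
-- ===== SOURCE B (Python) =====
-- def is_DiEulerian(adjList):
--     # Staged passes instead of a one-pass sentinel loop:
--     # (1) count the nonzero second components; must be exactly 2;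
--     # (2) the first nonzero (scanning forward) must be -1;
--     # (3) the first nonzero scanning BACKWARD must be 1.
--     n_nonzero = sum(1 for e in adjList if e[1] != 0)
--     if n_nonzero != 2:
--         return False
--     first = next(e[1] for e in adjList if e[1] != 0)
--     last = next(e[1] for e in reversed(adjList) if e[1] != 0)
--     return first == -1 and last == 1
-- ===== Notes on version B (the rewrite author's own statement) =====
-- stated objective: alternative
-- what changed: Replaces A's single forward pass with two sentinel variables and an early return by three staged scans: a counting pass requiring exactly two nonzero second components, a forward scan for the first nonzero (must be -1), and a backward scan over reversed(adjList) for the last nonzero (must be 1); A's dead disjunct (D2 == 1 and D2 == -1) disappears.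
-- outside the precondition, e.g. on is_DiEulerian([[0, 1], [0, -1], [0, 2], [0]]): A returns False, B raises IndexError
import Mathlib
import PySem

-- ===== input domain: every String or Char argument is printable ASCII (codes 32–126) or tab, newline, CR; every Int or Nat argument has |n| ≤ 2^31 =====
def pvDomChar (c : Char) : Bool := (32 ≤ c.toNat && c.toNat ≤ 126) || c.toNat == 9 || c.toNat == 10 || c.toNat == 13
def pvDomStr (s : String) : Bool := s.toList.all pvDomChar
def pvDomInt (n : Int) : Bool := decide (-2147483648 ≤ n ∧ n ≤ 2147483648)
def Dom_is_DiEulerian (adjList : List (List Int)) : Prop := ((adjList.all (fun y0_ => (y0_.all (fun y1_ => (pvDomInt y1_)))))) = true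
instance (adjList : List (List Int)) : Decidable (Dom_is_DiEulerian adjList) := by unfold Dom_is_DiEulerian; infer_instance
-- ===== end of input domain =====

-- B replaces A's one-pass sentinel loop by three staged scans (count of nonzeros = 2,
-- first nonzero scanning forward = -1, first nonzero scanning backward = 1); same cost.


-- ===== PORT A =====
-- the loop of A: state (D1, D2) : Option Int × Option Int; early return False on a third nonzero;
-- final check is Python's '(D1 == -1 and D2 == 1) or (D2 == 1 and D2 == -1)' (second disjunct dead).
def is_DiEulerian_go (l : List (List Int)) (D1 D2 : Option Int) : Bool :=
  match l with
  | [] => decide ((D1 = some (-1) ∧ D2 = some 1) ∨ (D2 = some 1 ∧ D2 = some (-1)))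
  | e :: rest =>
      let v := (PySem.List.pyGet? e 1).getD 0   -- e[1]; Pre_ excludes the IndexError case
      if v ≠ 0 then
        if D1 = none then is_DiEulerian_go rest (some v) D2
        else if D2 = none then is_DiEulerian_go rest D1 (some v)
        else false
      else is_DiEulerian_go rest D1 D2

def is_DiEulerian (adjList : List (List Int)) : Bool :=
  is_DiEulerian_go adjList none none

-- ===== PORT B =====
-- staged passes of Source B: count, first nonzero forward, first nonzero over the reversed list
def is_DiEulerian_alt (adjList : List (List Int)) : Bool :=
  let val : List Int → Int := fun e => (PySem.List.pyGet? e 1).getD 0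
  let n := adjList.countP (fun e => decide (val e ≠ 0))
  if n ≠ 2 then false
  else
    let first := (adjList.find? (fun e => decide (val e ≠ 0))).map val
    let last := (adjList.reverse.find? (fun e => decide (val e ≠ 0))).map val
    decide (first = some (-1) ∧ last = some 1)

-- ===== PRECONDITION & SPEC =====
-- Pre_ excludes inputs containing an inner list of length < 2: there Python A raises IndexError on
-- e[1] (or, when a third nonzero precedes the short row, A happens to return False while B raises).
def Pre_is_DiEulerian (adjList : List (List Int)) : Prop :=
  ∀ e ∈ adjList, 2 ≤ e.length
instance (adjList : List (List Int)) : Decidable (Pre_is_DiEulerian adjList) := by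
  unfold Pre_is_DiEulerian; infer_instance
def pvWitness_is_DiEulerian : List (List Int) := [[0, -1], [0, 1]]

def Spec_is_DiEulerian (adjList : List (List Int)) (out : Bool) : Prop := out = is_DiEulerian_alt adjList
instance (adjList : List (List Int)) (out : Bool) : Decidable (Spec_is_DiEulerian adjList out) := by unfold Spec_is_DiEulerian; infer_instance

-- ===== CLAIM (what is proved, stated in full; the proofs are below) =====
def Claim_equal_is_DiEulerian : Prop := ∀ (adjList : List (List Int)), Dom_is_DiEulerian adjList → Pre_is_DiEulerian adjList → Spec_is_DiEulerian adjList (is_DiEulerian adjList)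

-- ===== LEMMAS AND PROOFS =====
-- the list of nonzero second components (proof device shared by both directions)
def pvNz (l : List (List Int)) : List Int :=
  l.filterMap (fun e =>
    let v := (PySem.List.pyGet? e 1).getD 0
    if v ≠ 0 then some v else none)

-- loop invariant: A's loop with state (D1, D2) decides equality of the reassembled list with [-1,1]
theorem is_DiEulerian_go_eq (l : List (List Int)) :
    (is_DiEulerian_go l none none = decide (pvNz l = [-1, 1])) ∧
    (∀ a : Int, is_DiEulerian_go l (some a) none = decide (a :: pvNz l = [-1, 1])) ∧
    (∀ a b : Int, is_DiEulerian_go l (some a) (some b) = decide ([a, b] ++ pvNz l = [-1, 1])) := by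
  induction l with
  | nil => simp [is_DiEulerian_go, pvNz]
  | cons e rest ih =>
    obtain ⟨ih0, ih1, ih2⟩ := ih
    by_cases hv : (PySem.List.pyGet? e 1).getD 0 = 0
    · refine ⟨?_, fun a => ?_, fun a b => ?_⟩ <;>
        simp [is_DiEulerian_go, pvNz, hv, ih0, ih1, ih2]
    · refine ⟨?_, fun a => ?_, fun a b => ?_⟩ <;>
        simp [is_DiEulerian_go, pvNz, hv, ih1, ih2]

-- B's counting pass counts the length of pvNz
theorem countP_eq_length_pvNz (l : List (List Int)) :
    l.countP (fun e => decide ((PySem.List.pyGet? e 1).getD 0 ≠ 0)) = (pvNz l).length := by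
  induction l with
  | nil => simp [pvNz]
  | cons e rest ih =>
    by_cases hv : (PySem.List.pyGet? e 1).getD 0 = 0
    · simp [pvNz, hv] at ih ⊢
      exact ih
    · simp [pvNz, List.countP_cons, hv] at ih ⊢
      omega

-- B's forward scan finds the head of pvNz
theorem find?_map_eq_head_pvNz (l : List (List Int)) :
    (l.find? (fun e => decide ((PySem.List.pyGet? e 1).getD 0 ≠ 0))).map
        (fun e => (PySem.List.pyGet? e 1).getD 0) = (pvNz l).head? := by
  induction l with
  | nil => simp [pvNz]
  | cons e rest ih =>
    by_cases hv : (PySem.List.pyGet? e 1).getD 0 = 0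
    · simp [pvNz, hv] at ih ⊢
      exact ih
    · simp [pvNz, hv]

-- pvNz commutes with reversal
theorem pvNz_reverse (l : List (List Int)) : pvNz l.reverse = (pvNz l).reverse := by
  simp [pvNz, List.filterMap_reverse]

-- the three staged facts characterise equality with [-1, 1]
theorem staged_characterisation (m : List Int) :
    (if m.length ≠ 2 then false
     else decide (m.head? = some (-1) ∧ m.reverse.head? = some 1)) = decide (m = [-1, 1]) := by
  match m with
  | [] => simp
  | [a] => simp
  | [a, b] =>
    by_cases ha : a = -1 <;> by_cases hb : b = 1 <;> simp [ha, hb]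
  | a :: b :: c :: t => simp

-- ===== VERDICT (by name: the statement is the Claim_ definition above) =====
theorem is_DiEulerian_spec : Claim_equal_is_DiEulerian := by
  intro adjList _ _
  unfold Spec_is_DiEulerian is_DiEulerian is_DiEulerian_alt
  rw [(is_DiEulerian_go_eq adjList).1, ← staged_characterisation (pvNz adjList)]
  simp only [countP_eq_length_pvNz, ← pvNz_reverse, find?_map_eq_head_pvNz]
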